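-- pv_equiv track=rewrite | github.com/amjad2161/agency-agents | scripts/cloud_sync.py | _parse_lesson_entries
-- ===== SOURCE A (Python) =====
-- def _normalize_entry(entry: str) -> str:
--     return "\n".join(line.rstrip() for line in entry.strip().splitlines()).strip()
--
-- def _parse_lesson_entries(text: str) -> list[str]:
--     """Split a lessons file into discrete entries delimited by '## <timestamp>' headers."""
--     entries: list[str] = []
--     current: list[str] = []
--
--     for raw_line in text.splitlines():
--         stripped = raw_line.strip()
--         if stripped.startswith("## "):
--             if current:
--                 entry = _normalize_entry("\n".join(current))
--                 if entry:
--                     entries.append(entry)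
--             current = [stripped]
--         else:
--             if current:
--                 current.append(raw_line.rstrip())
--             elif stripped:
--                 current = [raw_line.rstrip()]
--
--     if current:
--         entry = _normalize_entry("\n".join(current))
--         if entry:
--             entries.append(entry)
--
--     return entries
-- ===== SOURCE B (Python) =====
-- def _normalize_entry(entry: str) -> str:
--     return "\n".join(line.rstrip() for line in entry.strip().splitlines()).strip()
--
-- def _parse_lesson_entries(text: str) -> list[str]:
--     lines = text.splitlines()
--     headers = [i for i, ln in enumerate(lines) if ln.strip().startswith("## ")]
--     starts = [0] + headers
--     ends = headers + [len(lines)]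
--     entries: list[str] = []
--     for a, b in zip(starts, ends):
--         entry = _normalize_entry("\n".join(lines[a:b]))
--         if entry:
--             entries.append(entry)
--     return entries
-- ===== Notes on version B (the rewrite author's own statement) =====
-- stated objective: alternative
-- what changed: Replaces A's stateful accumulate-and-flush loop (a `current` buffer flushed at each header) with a two-phase decomposition: one pass collects the indices of '## ' header lines, then the line list is sliced into segments at those indices and each segment is normalized and kept if non-empty.
import Mathlib
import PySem

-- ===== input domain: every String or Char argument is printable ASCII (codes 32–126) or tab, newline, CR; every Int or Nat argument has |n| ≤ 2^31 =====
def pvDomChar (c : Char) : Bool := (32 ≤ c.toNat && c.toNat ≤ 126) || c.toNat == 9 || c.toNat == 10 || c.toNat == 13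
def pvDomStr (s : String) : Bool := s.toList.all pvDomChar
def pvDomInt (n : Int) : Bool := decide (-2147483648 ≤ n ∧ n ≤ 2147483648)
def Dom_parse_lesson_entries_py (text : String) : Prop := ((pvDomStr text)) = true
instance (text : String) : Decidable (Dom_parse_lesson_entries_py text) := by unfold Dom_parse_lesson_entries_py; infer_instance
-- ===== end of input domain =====

-- B replaces A's stateful accumulator-flush loop by a two-phase decomposition: find header line
-- indices, slice the line list into segments, normalize each segment (objective: alternative).

set_option maxHeartbeats 1000000


-- ===== PORT A =====
-- _normalize_entry (module helper shared by both implementations)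
def normalize_entry (entry : String) : String :=
  PySem.Str.strip (PySem.Str.join "\n" ((PySem.Str.splitlines (PySem.Str.strip entry)).map PySem.Str.rstrip))

-- the 'if current: entry = _normalize_entry(...); if entry: entries.append(entry)' flush step
def pvFlushA (entries current : List String) : List String :=
  if current = [] then entries
  else
    let entry := normalize_entry (PySem.Str.join "\n" current)
    if entry = "" then entries else entries ++ [entry]

-- one iteration of A's for-loop; state = (entries, current)
def pvStepA (st : List String × List String) (raw_line : String) : List String × List String :=
  if PySem.Str.startswith (PySem.Str.strip raw_line) "## " then
    (pvFlushA st.1 st.2, [PySem.Str.strip raw_line])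
  else if st.2 ≠ [] then
    (st.1, st.2 ++ [PySem.Str.rstrip raw_line])
  else if PySem.Str.strip raw_line ≠ "" then
    (st.1, [PySem.Str.rstrip raw_line])
  else st

def parse_lesson_entries_py (text : String) : List String :=
  let st := (PySem.Str.splitlines text).foldl pvStepA ([], [])
  pvFlushA st.1 st.2

-- ===== PORT B =====
-- ln.strip().startswith('## ')
def pvIsHeader (ln : String) : Bool := PySem.Str.startswith (PySem.Str.strip ln) "## "

def parse_lesson_entries_py_alt (text : String) : List String :=
  let lines := PySem.Str.splitlines text
  let headers := ((PySem.List.enumerate lines).filter (fun p => pvIsHeader p.2)).map (fun p => p.1)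
  let starts := (0 : Int) :: headers
  let ends := headers ++ [(lines.length : Int)]
  (starts.zip ends).foldl (fun acc p =>
    let entry := normalize_entry (PySem.Str.join "\n" (PySem.List.slice lines (some p.1) (some p.2)))
    if entry = "" then acc else acc ++ [entry]) []

-- ===== PRECONDITION & SPEC =====
def Spec_parse_lesson_entries_py (text : String) (out : List String) : Prop := out = parse_lesson_entries_py_alt text
instance (text : String) (out : List String) : Decidable (Spec_parse_lesson_entries_py text out) := by unfold Spec_parse_lesson_entries_py; infer_instance

-- ===== CLAIM (what is proved, stated in full; the proofs are below) =====
def Claim_equal_parse_lesson_entries_py : Prop := ∀ (text : String), Dom_parse_lesson_entries_py text → Spec_parse_lesson_entries_py text (parse_lesson_entries_py text)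

-- ===== LEMMAS AND PROOFS =====

-- ---------- Char-level abbreviations ----------

-- the break predicate splitlines uses (same closed expression as in PySem.Chars.splitlines)
def pvB (c : Char) : Bool :=
  have n := c.toNat
  decide (n = 10) || decide (n = 13) || decide (n = 11) || decide (n = 12) || decide (n = 28) ||
    decide (n = 29) || decide (n = 30) || decide (n = 133) || decide (n = 8232) || decide (n = 8233)

-- break-free (no line-break characters)
def pvBF (l : List Char) : Prop := ∀ c ∈ l, pvB c = false

-- all characters whitespace (i.e. the line strips to empty)
def pvAllSP (l : List Char) : Bool := l.all PySem.Chars.isspace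

theorem go_nil (isB : Char → Bool) (cur : List Char) (acc : List (List Char)) :
    PySem.Chars.splitlines.go isB [] cur acc
      = if cur.isEmpty then acc.reverse else (cur.reverse :: acc).reverse := by
  rw [PySem.Chars.splitlines.go]

theorem go_cons_nb (c : Char) (rest cur : List Char) (acc : List (List Char))
    (h1 : pvB c = false) :
    PySem.Chars.splitlines.go pvB (c :: rest) cur acc
      = PySem.Chars.splitlines.go pvB rest (c :: cur) acc := by
  have hc : c ≠ '\x0d' := by intro h; subst h; simp [pvB] at h1
  rw [PySem.Chars.splitlines.go]
  · simp [h1]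
  · exact fun _ h _ => absurd h hc

theorem go_cons_nl (rest cur : List Char) (acc : List (List Char)) :
    PySem.Chars.splitlines.go pvB ('\n' :: rest) cur acc
      = PySem.Chars.splitlines.go pvB rest [] (cur.reverse :: acc) := by
  rw [PySem.Chars.splitlines.go]
  · simp [pvB]
  · exact fun _ h _ => by simp at h

theorem go_crlf (rest cur : List Char) (acc : List (List Char)) :
    PySem.Chars.splitlines.go pvB ('\x0d' :: '\n' :: rest) cur acc
      = PySem.Chars.splitlines.go pvB rest [] (cur.reverse :: acc) := by
  rw [PySem.Chars.splitlines.go]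

theorem go_cons_br (c : Char) (rest cur : List Char) (acc : List (List Char))
    (h1 : pvB c = true) (h2 : c = '\x0d' → rest.head? ≠ some '\n') :
    PySem.Chars.splitlines.go pvB (c :: rest) cur acc
      = PySem.Chars.splitlines.go pvB rest [] (cur.reverse :: acc) := by
  rw [PySem.Chars.splitlines.go]
  · simp [h1]
  · intro r hc hr; exact h2 hc (by rw [hr]; rfl)

theorem go_chunk (l : List Char) (hl : pvBF l) (cur : List Char) (acc : List (List Char)) :
    PySem.Chars.splitlines.go pvB l cur acc
      = if (l.reverse ++ cur).isEmpty then acc.reverse else ((l.reverse ++ cur).reverse :: acc).reverse := by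
  induction l generalizing cur with
  | nil => simp [go_nil]
  | cons c l ih =>
    rw [go_cons_nb c l cur acc (hl c (by simp)), ih (fun x hx => hl x (by simp [hx]))]
    simp

theorem go_chunk_nl (l : List Char) (hl : pvBF l) (s cur : List Char) (acc : List (List Char)) :
    PySem.Chars.splitlines.go pvB (l ++ '\n' :: s) cur acc
      = PySem.Chars.splitlines.go pvB s [] ((cur.reverse ++ l) :: acc) := by
  induction l generalizing cur with
  | nil => simpa using go_cons_nl s cur acc
  | cons c l ih =>
    rw [List.cons_append, go_cons_nb c _ cur acc (hl c (by simp)), ih (fun x hx => hl x (by simp [hx]))]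
    simp

theorem go_acc (n : Nat) : ∀ (s : List Char), s.length ≤ n → ∀ (cur : List Char) (acc : List (List Char)),
    PySem.Chars.splitlines.go pvB s cur acc
      = acc.reverse ++ PySem.Chars.splitlines.go pvB s cur [] := by
  induction n with
  | zero =>
    intro s hs cur acc
    have : s = [] := by cases s <;> simp_all
    subst this; simp [go_nil]; split <;> simp
  | succ n ih =>
    intro s hs cur acc
    match s with
    | [] => simp [go_nil]; split <;> simp
    | c :: rest =>
      by_cases hb : pvB c = true
      · by_cases hcr : c = '\x0d' ∧ rest.head? = some '\n'
        · obtain ⟨hc, hr⟩ := hcr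
          cases rest with
          | nil => simp at hr
          | cons c0 r =>
            have hc0 : c0 = '\n' := by simpa using hr
            subst hc0; subst hc
            rw [go_crlf, go_crlf, ih r (by simp at hs; omega), ih r (by simp at hs; omega) [] [cur.reverse]]
            simp
        · have h2 : c = '\x0d' → rest.head? ≠ some '\n' := fun hc hr => hcr ⟨hc, hr⟩
          rw [go_cons_br c rest cur acc hb h2, go_cons_br c rest cur [] hb h2,
            ih rest (by simp at hs; omega), ih rest (by simp at hs; omega) [] [cur.reverse]]
          simp
      · rw [go_cons_nb c rest cur acc (by simpa using hb), go_cons_nb c rest cur [] (by simpa using hb)]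
        exact ih rest (by simp at hs; omega) _ _

theorem go_bfree (n : Nat) : ∀ (s : List Char), s.length ≤ n → ∀ (cur : List Char) (acc : List (List Char)),
    pvBF cur → (∀ l ∈ acc, pvBF l) →
    ∀ l ∈ PySem.Chars.splitlines.go pvB s cur acc, pvBF l := by
  induction n with
  | zero =>
    intro s hs cur acc hcur hacc
    have : s = [] := by cases s <;> simp_all
    subst this; rw [go_nil]; split
    · simpa using hacc
    · simp only [List.mem_reverse, List.mem_cons]
      rintro l (rfl | hl)
      · intro c hc; exact hcur c (by simpa using hc)
      · exact hacc l hl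
  | succ n ih =>
    intro s hs cur acc hcur hacc
    have hrevcur : pvBF cur.reverse := fun c hc => hcur c (by simpa using hc)
    match s with
    | [] =>
      rw [go_nil]; split
      · simpa using hacc
      · simp only [List.mem_reverse, List.mem_cons]
        rintro l (rfl | hl)
        · exact hrevcur
        · exact hacc l hl
    | c :: rest =>
      by_cases hb : pvB c = true
      · by_cases hcr : c = '\x0d' ∧ rest.head? = some '\n'
        · obtain ⟨hc, hr⟩ := hcr
          cases rest with
          | nil => simp at hr
          | cons c0 r =>
            have hc0 : c0 = '\n' := by simpa using hr
            subst hc0; subst hc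
            rw [go_crlf]
            refine ih r (by simp at hs; omega) [] _ (by simp [pvBF]) ?_
            intro l hl
            simp only [List.mem_cons] at hl
            rcases hl with rfl | hl
            · exact hrevcur
            · exact hacc l hl
        · have h2 : c = '\x0d' → rest.head? ≠ some '\n' := fun hc hr => hcr ⟨hc, hr⟩
          rw [go_cons_br c rest cur acc hb h2]
          refine ih rest (by simp at hs; omega) [] _ (by simp [pvBF]) ?_
          intro l hl
          simp only [List.mem_cons] at hl
          rcases hl with rfl | hl
          · exact hrevcur
          · exact hacc l hl
      · rw [go_cons_nb c rest cur acc (by simpa using hb)]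
        refine ih rest (by simp at hs; omega) (c :: cur) acc ?_ hacc
        intro x hx
        simp only [List.mem_cons] at hx
        rcases hx with rfl | hx
        · simp_all
        · exact hcur x hx

theorem splitlines_bfree (s : List Char) : ∀ l ∈ PySem.Chars.splitlines s, pvBF l :=
  go_bfree s.length s le_rfl [] [] (by simp [pvBF]) (by simp)

theorem splitlines_join (ls : List (List Char)) (hbf : ∀ l ∈ ls, pvBF l)
    (hne : ls ≠ []) (hlast : ls.getLast hne ≠ []) :
    PySem.Chars.splitlines (PySem.Chars.join ['\n'] ls) = ls := by
  induction ls with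
  | nil => exact absurd rfl hne
  | cons a t iht =>
    cases t with
    | nil =>
      have ha : a ≠ [] := by simpa using hlast
      show PySem.Chars.splitlines.go pvB (PySem.Chars.join ['\n'] [a]) [] [] = [a]
      rw [PySem.Chars.join_singleton, go_chunk a (hbf a (by simp)) [] []]
      simp [ha]
    | cons b t2 =>
      show PySem.Chars.splitlines.go pvB (PySem.Chars.join ['\n'] (a :: b :: t2)) [] [] = _
      rw [PySem.Chars.join_cons_cons]
      have : a ++ ['\n'] ++ PySem.Chars.join ['\n'] (b :: t2)
          = a ++ '\n' :: PySem.Chars.join ['\n'] (b :: t2) := by simp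
      rw [this, go_chunk_nl a (hbf a (by simp)) _ [] []]
      simp only [List.reverse_nil, List.nil_append]
      rw [go_acc (PySem.Chars.join ['\n'] (b :: t2)).length _ le_rfl [] [a]]
      have hgo : PySem.Chars.splitlines.go pvB (PySem.Chars.join ['\n'] (b :: t2)) [] []
          = PySem.Chars.splitlines (PySem.Chars.join ['\n'] (b :: t2)) := rfl
      rw [hgo, iht (fun l hl => hbf l (by simp [hl])) (by simp)
        (by simpa [List.getLast_cons] using hlast)]
      simp

theorem lstrip_eq_nil_iff (l : List Char) : PySem.Chars.lstrip l = [] ↔ pvAllSP l = true := by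
  simp [PySem.Chars.lstrip, List.dropWhile_eq_nil_iff, pvAllSP, PySem.Chars.isspace, List.all_eq_true]

theorem rstrip_eq_nil_iff (l : List Char) : PySem.Chars.rstrip l = [] ↔ pvAllSP l = true := by
  simp [PySem.Chars.rstrip, List.dropWhile_eq_nil_iff, pvAllSP, PySem.Chars.isspace, List.all_eq_true]

theorem lstrip_append_allsp {a : List Char} (h : pvAllSP a = true) (b : List Char) :
    PySem.Chars.lstrip (a ++ b) = PySem.Chars.lstrip b := by
  have hnil : PySem.Chars.lstrip a = [] := (lstrip_eq_nil_iff a).mpr h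
  unfold PySem.Chars.lstrip at *
  rw [List.dropWhile_append, hnil]
  simp

theorem lstrip_append_ne {a : List Char} (h : PySem.Chars.lstrip a ≠ []) (b : List Char) :
    PySem.Chars.lstrip (a ++ b) = PySem.Chars.lstrip a ++ b := by
  unfold PySem.Chars.lstrip at *
  rw [List.dropWhile_append, if_neg (by simpa [List.isEmpty_iff] using h)]

theorem rstrip_eq_lstrip_rev (l : List Char) :
    PySem.Chars.rstrip l = (PySem.Chars.lstrip l.reverse).reverse := rfl

theorem allsp_reverse (l : List Char) : pvAllSP l.reverse = pvAllSP l := by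
  simp [pvAllSP]

theorem rstrip_append_allsp (a : List Char) {b : List Char} (h : pvAllSP b = true) :
    PySem.Chars.rstrip (a ++ b) = PySem.Chars.rstrip a := by
  rw [rstrip_eq_lstrip_rev, rstrip_eq_lstrip_rev, List.reverse_append,
    lstrip_append_allsp (by rw [allsp_reverse]; exact h)]

theorem rstrip_append_ne (a : List Char) {b : List Char} (h : PySem.Chars.rstrip b ≠ []) :
    PySem.Chars.rstrip (a ++ b) = a ++ PySem.Chars.rstrip b := by
  rw [rstrip_eq_lstrip_rev, rstrip_eq_lstrip_rev, List.reverse_append,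
    lstrip_append_ne (by intro hh; exact h (by rw [rstrip_eq_lstrip_rev, hh]; rfl))]
  simp

theorem lstrip_cons_sp' {c : Char} (h : PySem.Chars.isspace c = true) (t : List Char) :
    PySem.Chars.lstrip (c :: t) = PySem.Chars.lstrip t := by
  unfold PySem.Chars.lstrip
  rw [List.dropWhile_cons_of_pos h]

theorem lstrip_cons_nsp' {c : Char} (h : PySem.Chars.isspace c = false) (t : List Char) :
    PySem.Chars.lstrip (c :: t) = c :: t := by
  unfold PySem.Chars.lstrip
  rw [List.dropWhile_cons_of_neg (by simp [h])]

theorem lstrip_head_not_sp {l : List Char} {c : Char} {r : List Char}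
    (h : PySem.Chars.lstrip l = c :: r) : PySem.Chars.isspace c = false := by
  induction l with
  | nil => simp [PySem.Chars.lstrip] at h
  | cons a t ih =>
    by_cases ha : PySem.Chars.isspace a = true
    · rw [lstrip_cons_sp' ha] at h; exact ih h
    · have ha' : PySem.Chars.isspace a = false := by simpa using ha
      rw [lstrip_cons_nsp' ha'] at h
      injection h with h1 h2
      rw [← h1]; exact ha'

theorem lstrip_noop {l : List Char} (h : ∀ c r, l = c :: r → PySem.Chars.isspace c = false) :
    PySem.Chars.lstrip l = l := by
  cases l with
  | nil => rfl
  | cons c r =>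
    exact lstrip_cons_nsp' (h c r rfl) r

theorem rstrip_noop {l : List Char} (h : ∀ c r, l.reverse = c :: r → PySem.Chars.isspace c = false) :
    PySem.Chars.rstrip l = l := by
  rw [rstrip_eq_lstrip_rev, lstrip_noop h, List.reverse_reverse]

theorem lstrip_idem (l : List Char) :
    PySem.Chars.lstrip (PySem.Chars.lstrip l) = PySem.Chars.lstrip l := by
  apply lstrip_noop
  intro c r h
  exact lstrip_head_not_sp h

theorem rstrip_idem (l : List Char) :
    PySem.Chars.rstrip (PySem.Chars.rstrip l) = PySem.Chars.rstrip l := by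
  rw [rstrip_eq_lstrip_rev l, rstrip_eq_lstrip_rev, List.reverse_reverse, lstrip_idem]

theorem rstrip_cons (c : Char) (t : List Char) :
    PySem.Chars.rstrip (c :: t)
      = if PySem.Chars.rstrip t = [] then PySem.Chars.rstrip [c] else c :: PySem.Chars.rstrip t := by
  split
  · next hn =>
    have := rstrip_append_allsp [c] (b := t) ((rstrip_eq_nil_iff t).mp hn)
    simpa using this
  · next hn =>
    have := rstrip_append_ne [c] (b := t) hn
    simpa using this

theorem lstrip_rstrip_comm (l : List Char) :
    PySem.Chars.lstrip (PySem.Chars.rstrip l) = PySem.Chars.rstrip (PySem.Chars.lstrip l) := by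
  induction l with
  | nil => rfl
  | cons c t ih =>
    by_cases hc : PySem.Chars.isspace c = true
    · rw [lstrip_cons_sp' hc, rstrip_cons]
      by_cases hn : PySem.Chars.rstrip t = []
      · rw [if_pos hn]
        have hsc : PySem.Chars.rstrip [c] = [] := by
          rw [rstrip_eq_nil_iff]; simp [pvAllSP, hc]
        rw [hsc]
        have : PySem.Chars.lstrip t = [] :=
          (lstrip_eq_nil_iff t).mpr ((rstrip_eq_nil_iff t).mp hn)
        rw [this]
        rfl
      · rw [if_neg hn, lstrip_cons_sp' hc, ih]
    · have hc' : PySem.Chars.isspace c = false := by simpa using hc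
      have hrc : PySem.Chars.rstrip [c] = [c] := by
        apply rstrip_noop; intro a r h; simp at h; rw [← h.1]; exact hc'
      rw [lstrip_cons_nsp' hc', rstrip_cons]
      by_cases hn : PySem.Chars.rstrip t = []
      · rw [if_pos hn, hrc, lstrip_cons_nsp' hc']
      · rw [if_neg hn, lstrip_cons_nsp' hc']

theorem rstrip_decomp (l : List Char) :
    l = PySem.Chars.rstrip l ++ (List.takeWhile PySem.Chars.isspace l.reverse).reverse := by
  rw [rstrip_eq_lstrip_rev]
  unfold PySem.Chars.lstrip
  rw [← List.reverse_append, List.takeWhile_append_dropWhile, List.reverse_reverse]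

theorem lstrip_decomp (l : List Char) :
    l = List.takeWhile PySem.Chars.isspace l ++ PySem.Chars.lstrip l := by
  unfold PySem.Chars.lstrip
  rw [List.takeWhile_append_dropWhile]

theorem allsp_rstrip (l : List Char) : pvAllSP (PySem.Chars.rstrip l) = pvAllSP l := by
  by_cases h : pvAllSP (PySem.Chars.rstrip l) = true
  · rw [h]
    symm
    rw [pvAllSP, List.all_eq_true]
    intro c hc
    rw [rstrip_decomp l, List.mem_append] at hc
    rcases hc with hc | hc
    · exact (List.all_eq_true.mp h) c hc
    · exact List.mem_takeWhile_imp (by simpa using hc)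
  · have h' : pvAllSP (PySem.Chars.rstrip l) = false := by simpa using h
    rw [h']
    symm
    rw [← Bool.not_eq_true, pvAllSP, List.all_eq_true]
    intro hall
    exact h (List.all_eq_true.mpr (fun c hc =>
      hall c ((rstrip_decomp l ▸ List.mem_append_left _ hc))))

theorem allsp_lstrip (l : List Char) : pvAllSP (PySem.Chars.lstrip l) = pvAllSP l := by
  by_cases h : pvAllSP (PySem.Chars.lstrip l) = true
  · rw [h]
    symm
    rw [pvAllSP, List.all_eq_true]
    intro c hc
    rw [lstrip_decomp l, List.mem_append] at hc
    rcases hc with hc | hc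
    · exact List.mem_takeWhile_imp hc
    · exact (List.all_eq_true.mp h) c hc
  · have h' : pvAllSP (PySem.Chars.lstrip l) = false := by simpa using h
    rw [h']
    symm
    rw [← Bool.not_eq_true, pvAllSP, List.all_eq_true]
    intro hall
    exact h (List.all_eq_true.mpr (fun c hc =>
      hall c ((lstrip_decomp l ▸ List.mem_append_right _ hc))))

-- ---------- join-level lemmas ----------

theorem strip_eq_nil_iff (l : List Char) : PySem.Chars.strip l = [] ↔ pvAllSP l = true := by
  show PySem.Chars.rstrip (PySem.Chars.lstrip l) = [] ↔ _
  rw [rstrip_eq_nil_iff, allsp_lstrip]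

theorem join_append_singleton (ls : List (List Char)) (x : List Char) (h : ls ≠ []) :
    PySem.Chars.join ['\n'] (ls ++ [x]) = PySem.Chars.join ['\n'] ls ++ '\n' :: x := by
  induction ls with
  | nil => exact absurd rfl h
  | cons a t ih =>
    cases t with
    | nil => rw [List.nil_append] at *; simp [PySem.Chars.join_cons_cons, PySem.Chars.join_singleton]
    | cons b t2 =>
      have h1 : (a :: b :: t2) ++ [x] = a :: (b :: (t2 ++ [x])) := by simp
      rw [h1, PySem.Chars.join_cons_cons,
        show b :: (t2 ++ [x]) = (b :: t2) ++ [x] by simp, ih (by simp),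
        PySem.Chars.join_cons_cons]
      simp

-- first element kept by dropWhile fails the predicate
theorem dropWhile_head_false {α : Type} (p : α → Bool) (l : List α) {h : α} {t : List α}
    (hd : l.dropWhile p = h :: t) : p h = false := by
  induction l with
  | nil => simp at hd
  | cons a r ih =>
    by_cases ha : p a = true
    · rw [List.dropWhile_cons_of_pos ha] at hd; exact ih hd
    · rw [List.dropWhile_cons_of_neg ha] at hd
      injection hd with h1 _
      rw [← h1]; simpa using ha

def pvLstripHead : List (List Char) → List (List Char)
  | [] => []
  | h :: t => PySem.Chars.lstrip h :: t

def pvDropTrail (ls : List (List Char)) : List (List Char) :=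
  (ls.reverse.dropWhile pvAllSP).reverse

def pvRstripLast (ls : List (List Char)) : List (List Char) :=
  match ls.getLast? with
  | none => []
  | some x => ls.dropLast ++ [PySem.Chars.rstrip x]

theorem rstripLast_append (t : List (List Char)) (x : List Char) :
    pvRstripLast (t ++ [x]) = t ++ [PySem.Chars.rstrip x] := by
  unfold pvRstripLast
  rw [List.getLast?_concat]
  simp

theorem lstrip_join (ls : List (List Char)) :
    PySem.Chars.lstrip (PySem.Chars.join ['\n'] ls)
      = PySem.Chars.join ['\n'] (pvLstripHead (ls.dropWhile pvAllSP)) := by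
  induction ls with
  | nil => rfl
  | cons h t ih =>
    by_cases hh : pvAllSP h = true
    · rw [List.dropWhile_cons_of_pos hh]
      cases t with
      | nil =>
        rw [PySem.Chars.join_singleton]
        simp [pvLstripHead, PySem.Chars.join_nil, (lstrip_eq_nil_iff h).mpr hh]
      | cons b t2 =>
        rw [PySem.Chars.join_cons_cons, List.append_assoc,
          lstrip_append_allsp hh, lstrip_append_allsp (by simp [pvAllSP, PySem.Chars.isspace]), ih]
    · have hh' : PySem.Chars.lstrip h ≠ [] := fun hx => hh ((lstrip_eq_nil_iff h).mp hx)
      rw [List.dropWhile_cons_of_neg (by simpa using hh)]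
      cases t with
      | nil => rw [PySem.Chars.join_singleton]; simp [pvLstripHead, PySem.Chars.join_singleton]
      | cons b t2 =>
        rw [PySem.Chars.join_cons_cons, List.append_assoc, lstrip_append_ne hh',
          show pvLstripHead (h :: b :: t2) = PySem.Chars.lstrip h :: b :: t2 from rfl,
          PySem.Chars.join_cons_cons]
        simp

theorem dropTrail_cons_ne {a : List Char} (h : pvAllSP a = false) (t : List (List Char)) :
    pvDropTrail (a :: t) = a :: pvDropTrail t := by
  unfold pvDropTrail
  rw [List.reverse_cons, List.dropWhile_append]
  split
  · next he =>
    rw [List.dropWhile_cons_of_neg (by simp [h]), List.isEmpty_iff.mp he]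
    simp
  · simp

theorem dropTrail_append_allsp {x : List Char} (h : pvAllSP x = true) (t : List (List Char)) :
    pvDropTrail (t ++ [x]) = pvDropTrail t := by
  unfold pvDropTrail
  rw [List.reverse_append, show ([x].reverse ++ t.reverse) = x :: t.reverse by simp,
    List.dropWhile_cons_of_pos h]

theorem dropTrail_append_ne {x : List Char} (h : pvAllSP x = false) (t : List (List Char)) :
    pvDropTrail (t ++ [x]) = t ++ [x] := by
  unfold pvDropTrail
  rw [List.reverse_append, show ([x].reverse ++ t.reverse) = x :: t.reverse by simp,
    List.dropWhile_cons_of_neg (by simp [h])]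
  simp

theorem rstrip_join (ls : List (List Char)) :
    PySem.Chars.rstrip (PySem.Chars.join ['\n'] ls)
      = PySem.Chars.join ['\n'] (pvRstripLast (pvDropTrail ls)) := by
  induction ls using List.reverseRecOn with
  | nil => rfl
  | append_singleton t x ih =>
    by_cases hx : pvAllSP x = true
    · rw [dropTrail_append_allsp hx]
      cases t with
      | nil =>
        simp only [List.nil_append, PySem.Chars.join_singleton]
        rw [show pvDropTrail [] = [] from rfl]
        simpa [pvRstripLast, rstrip_eq_nil_iff] using hx
      | cons b t2 =>
        have hnx : pvAllSP ('\n' :: x) = true := by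
          rw [pvAllSP, List.all_cons]
          simp only [Bool.and_eq_true]; exact ⟨by decide, hx⟩
        rw [join_append_singleton _ x (by simp), rstrip_append_allsp _ (b := '\n' :: x) hnx, ih]
    · have hx' : pvAllSP x = false := by simpa using hx
      have hrx : PySem.Chars.rstrip x ≠ [] := fun hc => by
        rw [rstrip_eq_nil_iff] at hc; rw [hc] at hx'; simp at hx'
      rw [dropTrail_append_ne hx']
      cases t with
      | nil =>
        simp only [List.nil_append, PySem.Chars.join_singleton]
        simp [pvRstripLast, PySem.Chars.join_singleton]
      | cons b t2 =>
        rw [join_append_singleton _ x (by simp),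
          rstrip_append_ne _ (b := '\n' :: x)
            (by rw [rstrip_cons]; split <;> simp_all),
          rstrip_cons, if_neg hrx,
          rstripLast_append (b :: t2) x,
          join_append_singleton _ _ (by simp)]

-- ---------- the canonical form of a normalized entry ----------

def pvCanon (ls : List (List Char)) : List (List Char) :=
  (pvDropTrail (pvLstripHead (ls.dropWhile pvAllSP))).map PySem.Chars.rstrip

-- Chars-level transcription of _normalize_entry
def pvNormC (e : List Char) : List Char :=
  PySem.Chars.strip (PySem.Chars.join ['\n']
    ((PySem.Chars.splitlines (PySem.Chars.strip e)).map PySem.Chars.rstrip))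

theorem map_rstrip_rstripLast (ls : List (List Char)) :
    (pvRstripLast ls).map PySem.Chars.rstrip = ls.map PySem.Chars.rstrip := by
  cases hls : ls.getLast? with
  | none => rw [List.getLast?_eq_none_iff.mp hls]; rfl
  | some x =>
    obtain ⟨t, rfl⟩ : ∃ t, ls = t ++ [x] := by
      rcases List.eq_nil_or_concat ls with rfl | ⟨t, y, rfl⟩
      · simp at hls
      · simp at hls; exact ⟨t, by rw [hls]; simp⟩
    rw [rstripLast_append]
    simp [rstrip_idem]

theorem dropTrail_last_nsp (ls : List (List Char)) {h : List Char} {t : List (List Char)}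
    (hd : pvDropTrail ls = t ++ [h]) : pvAllSP h = false := by
  have : ls.reverse.dropWhile pvAllSP = h :: t.reverse := by
    have := congrArg List.reverse hd
    rw [pvDropTrail, List.reverse_reverse] at this
    simpa using this
  exact dropWhile_head_false _ _ this

theorem bf_mem_lstrip {l : List Char} (h : pvBF l) : pvBF (PySem.Chars.lstrip l) :=
  fun c hc => h c ((List.dropWhile_sublist _).subset hc)

theorem bf_mem_rstrip {l : List Char} (h : pvBF l) : pvBF (PySem.Chars.rstrip l) := by
  intro c hc
  rw [rstrip_eq_lstrip_rev, List.mem_reverse] at hc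
  have : c ∈ l.reverse := (List.dropWhile_sublist _).subset hc
  exact h c (List.mem_reverse.mp this)

theorem bf_mem_strip {l : List Char} (h : pvBF l) : pvBF (PySem.Chars.strip l) :=
  bf_mem_rstrip (bf_mem_lstrip h)

-- strip (join v) = join v when the first line starts, and the last line ends, with non-space
theorem lstrip_join_noop (hd : List Char) (tl : List (List Char))
    (hh : PySem.Chars.lstrip hd = hd) (hh_ne : hd ≠ []) :
    PySem.Chars.lstrip (PySem.Chars.join ['\n'] (hd :: tl)) = PySem.Chars.join ['\n'] (hd :: tl) := by
  cases tl with
  | nil => rw [PySem.Chars.join_singleton, hh]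
  | cons b t2 =>
    rw [PySem.Chars.join_cons_cons, List.append_assoc,
      lstrip_append_ne (by rw [hh]; exact hh_ne), hh]

theorem rstrip_join_noop (v : List (List Char)) (hne : v ≠ [])
    (hl : PySem.Chars.rstrip (v.getLast hne) = v.getLast hne)
    (hl_ne : v.getLast hne ≠ []) :
    PySem.Chars.rstrip (PySem.Chars.join ['\n'] v) = PySem.Chars.join ['\n'] v := by
  induction v using List.reverseRecOn with
  | nil => exact absurd rfl hne
  | append_singleton t x _ =>
    have hx : PySem.Chars.rstrip x = x := by
      have := hl; rwa [List.getLast_append] at this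
    have hx_ne : x ≠ [] := by
      have := hl_ne; rwa [List.getLast_append] at this
    cases t with
    | nil => rw [List.nil_append, PySem.Chars.join_singleton]; exact hx
    | cons b t2 =>
      rw [join_append_singleton _ x (by simp),
        rstrip_append_ne _ (b := '\n' :: x)
          (by rw [rstrip_cons, hx, if_neg hx_ne]; simp),
        rstrip_cons, hx, if_neg hx_ne]

theorem strip_join_noop (v : List (List Char)) (hne : v ≠ [])
    (hh : PySem.Chars.lstrip (v.head hne) = v.head hne) (hh_ne : v.head hne ≠ [])
    (hl : PySem.Chars.rstrip (v.getLast hne) = v.getLast hne) (hl_ne : v.getLast hne ≠ []) :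
    PySem.Chars.strip (PySem.Chars.join ['\n'] v) = PySem.Chars.join ['\n'] v := by
  show PySem.Chars.rstrip (PySem.Chars.lstrip _) = _
  cases v with
  | nil => exact absurd rfl hne
  | cons hd tl =>
    rw [lstrip_join_noop hd tl hh hh_ne]
    exact rstrip_join_noop _ hne hl hl_ne

theorem splitlines_nil : PySem.Chars.splitlines [] = [] := rfl

theorem join_ne_nil {a : List Char} (ha : a ≠ []) (t : List (List Char)) :
    PySem.Chars.join ['\n'] (a :: t) ≠ [] := by
  cases t with
  | nil => rw [PySem.Chars.join_singleton]; exact ha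
  | cons b t2 => rw [PySem.Chars.join_cons_cons]; simp

theorem dropTrail_subset (t : List (List Char)) : ∀ x ∈ pvDropTrail t, x ∈ t := by
  intro x hx
  unfold pvDropTrail at hx
  rw [List.mem_reverse] at hx
  have := (List.dropWhile_sublist _).subset hx
  simpa using this

theorem dropTrail_map_rstrip (t : List (List Char)) :
    pvDropTrail (t.map PySem.Chars.rstrip) = (pvDropTrail t).map PySem.Chars.rstrip := by
  unfold pvDropTrail
  rw [← List.map_reverse, List.dropWhile_map, List.map_reverse]
  have : (pvAllSP ∘ PySem.Chars.rstrip) = pvAllSP := funext allsp_rstrip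
  rw [show (pvAllSP ∘ PySem.Chars.rstrip) = pvAllSP from this]

theorem map_rstrip_idem (t : List (List Char)) :
    (t.map PySem.Chars.rstrip).map PySem.Chars.rstrip = t.map PySem.Chars.rstrip := by
  rw [List.map_map]
  exact List.map_congr_left (fun x _ => rstrip_idem x)

theorem canon_map_rstrip (ls : List (List Char)) :
    pvCanon (ls.map PySem.Chars.rstrip) = pvCanon ls := by
  unfold pvCanon
  rw [List.dropWhile_map, show (pvAllSP ∘ PySem.Chars.rstrip) = pvAllSP from funext allsp_rstrip]
  cases hdl : ls.dropWhile pvAllSP with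
  | nil => rfl
  | cons h t =>
    have hnsp : pvAllSP h = false := dropWhile_head_false _ _ hdl
    show (pvDropTrail (PySem.Chars.lstrip (PySem.Chars.rstrip h) :: t.map PySem.Chars.rstrip)).map _
        = (pvDropTrail (PySem.Chars.lstrip h :: t)).map _
    rw [dropTrail_cons_ne (by rw [allsp_lstrip, allsp_rstrip]; exact hnsp),
      dropTrail_cons_ne (by rw [allsp_lstrip]; exact hnsp),
      List.map_cons, List.map_cons, dropTrail_map_rstrip, map_rstrip_idem,
      lstrip_rstrip_comm, rstrip_idem]

theorem canon_strip_head {h : List Char} (hh : pvAllSP h = false) (t : List (List Char)) :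
    pvCanon (PySem.Chars.strip h :: t) = pvCanon (h :: t) := by
  unfold pvCanon
  have hsh : pvAllSP (PySem.Chars.strip h) = false := by
    show pvAllSP (PySem.Chars.rstrip (PySem.Chars.lstrip h)) = false
    rw [allsp_rstrip, allsp_lstrip]; exact hh
  have hsh' : ¬pvAllSP (PySem.Chars.strip h) = true := by rw [hsh]; simp
  have hh' : ¬pvAllSP h = true := by rw [hh]; simp
  rw [List.dropWhile_cons_of_neg hsh', List.dropWhile_cons_of_neg hh']
  show (pvDropTrail (PySem.Chars.lstrip (PySem.Chars.strip h) :: t)).map _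
      = (pvDropTrail (PySem.Chars.lstrip h :: t)).map _
  have hls : PySem.Chars.lstrip (PySem.Chars.strip h) = PySem.Chars.strip h := by
    show PySem.Chars.lstrip (PySem.Chars.rstrip (PySem.Chars.lstrip h)) = _
    rw [lstrip_rstrip_comm, lstrip_idem]
    rfl
  rw [hls, dropTrail_cons_ne hsh, dropTrail_cons_ne (by rw [allsp_lstrip]; exact hh),
    List.map_cons, List.map_cons]
  congr 1
  show PySem.Chars.rstrip (PySem.Chars.rstrip (PySem.Chars.lstrip h)) = _
  rw [rstrip_idem]

theorem canon_nil_iff (ls : List (List Char)) :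
    pvCanon ls = [] ↔ ls.dropWhile pvAllSP = [] := by
  unfold pvCanon
  cases hdl : ls.dropWhile pvAllSP with
  | nil => simp [pvLstripHead, pvDropTrail]
  | cons h t =>
    have hnsp : pvAllSP h = false := dropWhile_head_false _ _ hdl
    show (pvDropTrail (PySem.Chars.lstrip h :: t)).map _ = [] ↔ _
    rw [dropTrail_cons_ne (by rw [allsp_lstrip]; exact hnsp)]
    simp

theorem canon_head_ne_nil {ls : List (List Char)} {a : List Char} {t : List (List Char)}
    (h : pvCanon ls = a :: t) : a ≠ [] := by
  unfold pvCanon at h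
  cases hdl : ls.dropWhile pvAllSP with
  | nil => rw [hdl] at h; simp [pvLstripHead, pvDropTrail] at h
  | cons x u =>
    have hnsp : pvAllSP x = false := dropWhile_head_false _ _ hdl
    rw [hdl] at h
    have : (pvDropTrail (PySem.Chars.lstrip x :: u)).map PySem.Chars.rstrip = a :: t := h
    rw [dropTrail_cons_ne (by rw [allsp_lstrip]; exact hnsp), List.map_cons] at this
    injection this with h1 _
    rw [← h1, Ne, rstrip_eq_nil_iff, allsp_lstrip]
    simp [hnsp]

theorem join_canon_eq_nil_iff (ls : List (List Char)) :
    PySem.Chars.join ['\n'] (pvCanon ls) = [] ↔ ls.dropWhile pvAllSP = [] := by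
  constructor
  · intro h
    cases hc : pvCanon ls with
    | nil => exact (canon_nil_iff ls).mp hc
    | cons a t =>
      rw [hc] at h
      exact absurd h (join_ne_nil (canon_head_ne_nil hc) t)
  · intro h
    rw [(canon_nil_iff ls).mpr h]
    rfl

theorem normC_join (ls : List (List Char)) (hbf : ∀ l ∈ ls, pvBF l) :
    pvNormC (PySem.Chars.join ['\n'] ls) = PySem.Chars.join ['\n'] (pvCanon ls) := by
  have h1 : PySem.Chars.strip (PySem.Chars.join ['\n'] ls)
      = PySem.Chars.join ['\n'] (pvRstripLast (pvDropTrail (pvLstripHead (ls.dropWhile pvAllSP)))) := by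
    show PySem.Chars.rstrip (PySem.Chars.lstrip _) = _
    rw [lstrip_join, rstrip_join]
  unfold pvNormC
  rw [h1]
  cases hdl : ls.dropWhile pvAllSP with
  | nil =>
    rw [show pvLstripHead [] = [] from rfl, show pvDropTrail [] = [] from rfl,
      show pvRstripLast [] = [] from rfl, PySem.Chars.join_nil, splitlines_nil]
    rw [(canon_nil_iff ls).mpr hdl]
    rfl
  | cons h t =>
    have hnsp : pvAllSP h = false := dropWhile_head_false _ _ hdl
    have hsub : ∀ x ∈ h :: t, x ∈ ls := by
      intro x hx
      rw [← hdl] at hx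
      exact (List.dropWhile_sublist _).subset hx
    have hlh_ne : PySem.Chars.lstrip h ≠ [] := by
      rw [Ne, lstrip_eq_nil_iff]; simp [hnsp]
    have hlh_nsp : pvAllSP (PySem.Chars.lstrip h) = false := by rw [allsp_lstrip]; exact hnsp
    rw [show pvLstripHead (h :: t) = PySem.Chars.lstrip h :: t from rfl,
      dropTrail_cons_ne hlh_nsp]
    -- ks = pvRstripLast (lstrip h :: pvDropTrail t)
    -- bfree of all elements of ks
    have hbf_ks : ∀ l ∈ pvRstripLast (PySem.Chars.lstrip h :: pvDropTrail t), pvBF l := by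
      rcases List.eq_nil_or_concat (pvDropTrail t) with hdt | ⟨u, z, hdt⟩
      · rw [hdt, show PySem.Chars.lstrip h :: ([] : List (List Char)) = [] ++ [PySem.Chars.lstrip h] by simp,
          rstripLast_append]
        intro l hl
        simp at hl
        rw [hl]
        exact bf_mem_rstrip (bf_mem_lstrip (hbf h (hsub h (by simp))))
      · rw [List.concat_eq_append] at hdt
        rw [hdt, show PySem.Chars.lstrip h :: (u ++ [z]) = (PySem.Chars.lstrip h :: u) ++ [z] by simp,
          rstripLast_append]
        intro l hl
        rw [List.mem_append] at hl
        rcases hl with hl | hl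
        · simp only [List.mem_cons] at hl
          rcases hl with hl | hl
          · rw [hl]; exact bf_mem_lstrip (hbf h (hsub h (by simp)))
          · have : l ∈ pvDropTrail t := by rw [hdt, List.mem_append]; left; exact hl
            exact hbf l (hsub l (by simp [dropTrail_subset t l this]))
        · simp at hl
          rw [hl]
          have : z ∈ pvDropTrail t := by rw [hdt]; simp
          exact bf_mem_rstrip (hbf z (hsub z (by simp [dropTrail_subset t z this])))
    have hcanon : pvCanon ls = (PySem.Chars.lstrip h :: pvDropTrail t).map PySem.Chars.rstrip := by
      unfold pvCanon
      rw [hdl]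
      show (pvDropTrail (PySem.Chars.lstrip h :: t)).map _ = _
      rw [dropTrail_cons_ne hlh_nsp]
    have hla : PySem.Chars.lstrip (PySem.Chars.rstrip (PySem.Chars.lstrip h))
        = PySem.Chars.rstrip (PySem.Chars.lstrip h) := by
      rw [lstrip_rstrip_comm, lstrip_idem]
    have ha_ne : PySem.Chars.rstrip (PySem.Chars.lstrip h) ≠ [] := by
      rw [Ne, rstrip_eq_nil_iff, allsp_lstrip]; simp [hnsp]
    rcases List.eq_nil_or_concat (pvDropTrail t) with hdt | ⟨u, z, hdt⟩
    · have hks : pvRstripLast (PySem.Chars.lstrip h :: pvDropTrail t)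
          = [PySem.Chars.rstrip (PySem.Chars.lstrip h)] := by
        rw [hdt]; simpa using rstripLast_append [] (PySem.Chars.lstrip h)
      rw [hks, splitlines_join _ (by rw [← hks]; exact hbf_ks) (by simp) (by simpa using ha_ne)]
      have hmr : [PySem.Chars.rstrip (PySem.Chars.lstrip h)].map PySem.Chars.rstrip
          = [PySem.Chars.rstrip (PySem.Chars.lstrip h)] := by rw [List.map_singleton, rstrip_idem]
      rw [hmr, hcanon, hdt,
        show (PySem.Chars.lstrip h :: ([] : List (List Char))).map PySem.Chars.rstrip
          = [PySem.Chars.rstrip (PySem.Chars.lstrip h)] from rfl]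
      exact strip_join_noop _ (by simp) (by simpa using hla) (by simpa using ha_ne)
        (by simpa using rstrip_idem (PySem.Chars.lstrip h)) (by simpa using ha_ne)
    · rw [List.concat_eq_append] at hdt
      have hz_nsp : pvAllSP z = false := dropTrail_last_nsp t hdt
      have hrz_ne : PySem.Chars.rstrip z ≠ [] := by
        rw [Ne, rstrip_eq_nil_iff]; simp [hz_nsp]
      have hks : pvRstripLast (PySem.Chars.lstrip h :: pvDropTrail t)
          = (PySem.Chars.lstrip h :: u) ++ [PySem.Chars.rstrip z] := by
        rw [hdt, show PySem.Chars.lstrip h :: (u ++ [z]) = (PySem.Chars.lstrip h :: u) ++ [z] by simp,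
          rstripLast_append]
      rw [hks, splitlines_join _ (by rw [← hks]; exact hbf_ks) (by simp)
        (by rw [List.getLast_append]; exact hrz_ne)]
      have hmapks : ((PySem.Chars.lstrip h :: u) ++ [PySem.Chars.rstrip z]).map PySem.Chars.rstrip
          = pvCanon ls := by
        rw [← hks, map_rstrip_rstripLast, ← hcanon]
      rw [hmapks]
      have hshape : pvCanon ls
          = (PySem.Chars.rstrip (PySem.Chars.lstrip h) :: u.map PySem.Chars.rstrip)
              ++ [PySem.Chars.rstrip z] := by
        rw [hcanon, hdt]
        simp
      rw [hshape]
      refine strip_join_noop _ (by simp) ?_ ?_ ?_ ?_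
      · simpa using hla
      · simpa using ha_ne
      · rw [List.getLast_append]
        simpa using rstrip_idem z
      · rw [List.getLast_append]
        exact hrz_ne

-- ---------- dropWhile idempotence and canon of a dropped list ----------

theorem dropWhile_idem {α : Type} (p : α → Bool) (l : List α) :
    (l.dropWhile p).dropWhile p = l.dropWhile p := by
  cases hdl : l.dropWhile p with
  | nil => rfl
  | cons h t => rw [List.dropWhile_cons_of_neg (by simp [dropWhile_head_false p l hdl])]

theorem canon_dropWhile (ls : List (List Char)) :
    pvCanon (ls.dropWhile pvAllSP) = pvCanon ls := by
  unfold pvCanon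
  rw [dropWhile_idem]

-- ---------- String-level bridge ----------

-- ln.strip() == "" (a blank line)
def pvBlank (l : String) : Bool := pvAllSP l.toList

theorem normalize_toList (s : String) : (normalize_entry s).toList = pvNormC s.toList := by
  unfold normalize_entry pvNormC
  rw [PySem.Str.toList_strip, PySem.Str.toList_join, List.map_map]
  have h1 : (String.toList ∘ PySem.Str.rstrip) = (PySem.Chars.rstrip ∘ String.toList) :=
    funext (fun x => PySem.Str.toList_rstrip x)
  rw [h1, ← List.map_map, PySem.Str.splitlines_map_toList, PySem.Str.toList_strip]
  rfl

theorem strip_eq_empty_iff (l : String) : (PySem.Str.strip l = "") ↔ pvBlank l = true := by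
  rw [← String.toList_inj, PySem.Str.toList_strip, show ("" : String).toList = [] from rfl,
    strip_eq_nil_iff]
  rfl

theorem header_not_blank {l : String} (h : pvIsHeader l = true) : pvBlank l = false := by
  unfold pvIsHeader at h
  rw [PySem.Str.startswith_eq, PySem.Chars.startswith_iff, PySem.Str.toList_strip] at h
  by_contra hb
  have hb' : pvAllSP l.toList = true := by
    cases hx : pvBlank l
    · exact absurd hx hb
    · exact hx
  rw [(strip_eq_nil_iff l.toList).mpr hb'] at h
  have := List.prefix_nil.mp h
  simp at this

-- the entry a segment normalizes to, as produced by _normalize_entry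
def pvNormS (seg : List String) : String := normalize_entry (PySem.Str.join "\n" seg)

def pvPush (acc : List String) (seg : List String) : List String :=
  if pvNormS seg = "" then acc else acc ++ [pvNormS seg]

theorem normS_toList (seg : List String) (hbf : ∀ l ∈ seg, pvBF l.toList) :
    (pvNormS seg).toList = PySem.Chars.join ['\n'] (pvCanon (seg.map String.toList)) := by
  unfold pvNormS
  rw [normalize_toList, PySem.Str.toList_join, show ("\n" : String).toList = ['\n'] from rfl]
  exact normC_join _ (by intro l hl; rw [List.mem_map] at hl; obtain ⟨x, hx, rfl⟩ := hl; exact hbf x hx)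

theorem normS_empty_iff (seg : List String) (hbf : ∀ l ∈ seg, pvBF l.toList) :
    (pvNormS seg = "") ↔ seg.dropWhile pvBlank = [] := by
  rw [← String.toList_inj, normS_toList seg hbf, show ("" : String).toList = [] from rfl,
    join_canon_eq_nil_iff, List.dropWhile_map,
    show (pvAllSP ∘ String.toList) = pvBlank from rfl]
  simp

theorem normS_eq_of_canon {seg1 seg2 : List String}
    (hbf1 : ∀ l ∈ seg1, pvBF l.toList) (hbf2 : ∀ l ∈ seg2, pvBF l.toList)
    (h : pvCanon (seg1.map String.toList) = pvCanon (seg2.map String.toList)) :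
    pvNormS seg1 = pvNormS seg2 := by
  rw [← String.toList_inj, normS_toList seg1 hbf1, normS_toList seg2 hbf2, h]

-- ---------- the flush of A's accumulated current equals pvPush of the raw segment ----------

theorem bf_str_rstrip {l : String} (h : pvBF l.toList) : pvBF (PySem.Str.rstrip l).toList := by
  rw [PySem.Str.toList_rstrip]; exact bf_mem_rstrip h

theorem map_toList_rstrip (seg : List String) :
    (seg.map PySem.Str.rstrip).map String.toList
      = (seg.map String.toList).map PySem.Chars.rstrip := by
  rw [List.map_map, List.map_map]
  exact List.map_congr_left (fun x _ => PySem.Str.toList_rstrip x)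

theorem fp_pre (seg : List String) (hbf : ∀ l ∈ seg, pvBF l.toList) (E : List String) :
    pvFlushA E ((seg.dropWhile pvBlank).map PySem.Str.rstrip) = pvPush E seg := by
  by_cases hd : seg.dropWhile pvBlank = []
  · rw [hd]
    show pvFlushA E [] = _
    rw [pvFlushA, if_pos rfl, pvPush, if_pos ((normS_empty_iff seg hbf).mpr hd)]
  · have hbf' : ∀ l ∈ (seg.dropWhile pvBlank).map PySem.Str.rstrip, pvBF l.toList := by
      intro l hl
      rw [List.mem_map] at hl
      obtain ⟨x, hx, rfl⟩ := hl
      exact bf_str_rstrip (hbf x ((List.dropWhile_sublist _).subset hx))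
    have hcur_ne : (seg.dropWhile pvBlank).map PySem.Str.rstrip ≠ [] := by
      simpa using hd
    have hentry : pvNormS ((seg.dropWhile pvBlank).map PySem.Str.rstrip) = pvNormS seg := by
      apply normS_eq_of_canon hbf' hbf
      rw [map_toList_rstrip, canon_map_rstrip,
        show pvBlank = (pvAllSP ∘ String.toList) from rfl, ← List.dropWhile_map, canon_dropWhile]
    rw [pvFlushA, if_neg hcur_ne]
    show (if pvNormS _ = "" then E else E ++ [pvNormS _]) = _
    rw [hentry, pvPush]

theorem fp_hdr (h : String) (r : List String) (hbf : ∀ l ∈ h :: r, pvBF l.toList)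
    (hh : pvIsHeader h = true) (E : List String) :
    pvFlushA E (PySem.Str.strip h :: r.map PySem.Str.rstrip) = pvPush E (h :: r) := by
  have hbs : pvBF (PySem.Str.strip h).toList := by
    rw [PySem.Str.toList_strip]; exact bf_mem_strip (hbf h (by simp))
  have hbf' : ∀ l ∈ PySem.Str.strip h :: r.map PySem.Str.rstrip, pvBF l.toList := by
    intro l hl
    rcases List.mem_cons.mp hl with rfl | hl
    · exact hbs
    · rw [List.mem_map] at hl
      obtain ⟨x, hx, rfl⟩ := hl
      exact bf_str_rstrip (hbf x (by simp [hx]))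
  have hnb : pvAllSP h.toList = false := header_not_blank hh
  have hentry : pvNormS (PySem.Str.strip h :: r.map PySem.Str.rstrip) = pvNormS (h :: r) := by
    apply normS_eq_of_canon hbf' hbf
    rw [List.map_cons, map_toList_rstrip, PySem.Str.toList_strip]
    have hstep : PySem.Chars.strip h.toList :: (r.map String.toList).map PySem.Chars.rstrip
        = (PySem.Chars.strip h.toList :: r.map String.toList).map PySem.Chars.rstrip := by
      rw [List.map_cons]
      congr 1
      show _ = PySem.Chars.rstrip (PySem.Chars.rstrip (PySem.Chars.lstrip h.toList))
      rw [rstrip_idem]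
      rfl
    rw [hstep, canon_map_rstrip, canon_strip_head hnb, List.map_cons]
  rw [pvFlushA, if_neg (by simp)]
  show (if pvNormS _ = "" then E else E ++ [pvNormS _]) = _
  rw [hentry, pvPush]

-- ---------- A's loop over a segment ----------

theorem a_run (seg : List String) (hnp : ∀ l ∈ seg, pvIsHeader l = false)
    (E : List String) : ∀ (cur : List String), cur ≠ [] →
    seg.foldl pvStepA (E, cur) = (E, cur ++ seg.map PySem.Str.rstrip) := by
  induction seg with
  | nil => intro cur _; simp
  | cons l t ih =>
    intro cur hcur
    have hl : pvIsHeader l = false := hnp l (by simp)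
    have hstep : pvStepA (E, cur) l = (E, cur ++ [PySem.Str.rstrip l]) := by
      unfold pvStepA
      rw [show (PySem.Str.startswith (PySem.Str.strip l) "## ") = pvIsHeader l from rfl, hl]
      simp [hcur]
    rw [List.foldl_cons, hstep, ih (fun x hx => hnp x (by simp [hx])) _ (by simp)]
    simp

theorem a_pre (seg : List String) (hnp : ∀ l ∈ seg, pvIsHeader l = false) (E : List String) :
    seg.foldl pvStepA (E, []) = (E, (seg.dropWhile pvBlank).map PySem.Str.rstrip) := by
  induction seg with
  | nil => simp
  | cons l t ih =>
    have hl : pvIsHeader l = false := hnp l (by simp)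
    by_cases hb : pvBlank l = true
    · have hstep : pvStepA (E, ([] : List String)) l = (E, []) := by
        unfold pvStepA
        rw [show (PySem.Str.startswith (PySem.Str.strip l) "## ") = pvIsHeader l from rfl, hl]
        simp [(strip_eq_empty_iff l).mpr hb]
      rw [List.foldl_cons, hstep, ih (fun x hx => hnp x (by simp [hx])),
        List.dropWhile_cons_of_pos hb]
    · have hb' : ¬(PySem.Str.strip l = "") := fun hx => hb ((strip_eq_empty_iff l).mp hx)
      have hstep : pvStepA (E, ([] : List String)) l = (E, [PySem.Str.rstrip l]) := by
        unfold pvStepA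
        rw [show (PySem.Str.startswith (PySem.Str.strip l) "## ") = pvIsHeader l from rfl, hl]
        simp [hb']
      rw [List.foldl_cons, hstep, a_run t (fun x hx => hnp x (by simp [hx])) E _ (by simp),
        List.dropWhile_cons_of_neg (by simpa using hb)]
      simp

-- ---------- the segment decomposition ----------

def pvGosegs : List String → List (List String)
  | [] => []
  | h :: t =>
    (h :: t.takeWhile (fun x => !pvIsHeader x)) :: pvGosegs (t.dropWhile (fun x => !pvIsHeader x))
  termination_by l => l.length
  decreasing_by
    simp only [List.length_cons]
    exact Nat.lt_succ_of_le (List.length_dropWhile_le _ _)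

def pvSegs (lines : List String) : List (List String) :=
  lines.takeWhile (fun x => !pvIsHeader x) :: pvGosegs (lines.dropWhile (fun x => !pvIsHeader x))

theorem master2 : ∀ (n : Nat) (t : List String), t.length ≤ n → (∀ l ∈ t, pvBF l.toList) →
    ∀ (E : List String) (h : String), pvIsHeader h = true → pvBF h.toList →
    pvFlushA (t.foldl pvStepA (E, [PySem.Str.strip h])).1 (t.foldl pvStepA (E, [PySem.Str.strip h])).2
      = ((h :: t.takeWhile (fun x => !pvIsHeader x))
          :: pvGosegs (t.dropWhile (fun x => !pvIsHeader x))).foldl pvPush E := by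
  intro n
  induction n with
  | zero =>
    intro t ht hbf E h hh hbh
    have : t = [] := by cases t <;> simp_all
    subst this
    simp only [List.foldl_nil, List.takeWhile_nil, List.dropWhile_nil]
    rw [show pvGosegs [] = [] from by rw [pvGosegs], List.foldl_cons, List.foldl_nil]
    exact fp_hdr h [] (by intro l hl; simp at hl; rw [hl]; exact hbh) hh E
  | succ n ih =>
    intro t ht hbf E h hh hbh
    have htw : ∀ l ∈ t.takeWhile (fun x => !pvIsHeader x), pvIsHeader l = false := by
      intro l hl
      have := List.mem_takeWhile_imp hl
      simpa using this
    conv_lhs => rw [← List.takeWhile_append_dropWhile (p := fun x => !pvIsHeader x) (l := t)]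
    rw [List.foldl_append,
      a_run _ htw E [PySem.Str.strip h] (by simp)]
    simp only [List.singleton_append]
    cases htd : t.dropWhile (fun x => !pvIsHeader x) with
    | nil =>
      rw [List.foldl_nil, show pvGosegs [] = [] from by rw [pvGosegs], List.foldl_cons, List.foldl_nil]
      have htwt : t.takeWhile (fun x => !pvIsHeader x) = t := by
        have := List.takeWhile_append_dropWhile (p := fun x => !pvIsHeader x) (l := t)
        rw [htd, List.append_nil] at this
        exact this
      exact fp_hdr h _ (by
        intro l hl
        rcases List.mem_cons.mp hl with rfl | hl
        · exact hbh
        · exact hbf l (htwt ▸ hl)) hh E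
    | cons h2 t2 =>
      have hh2 : pvIsHeader h2 = true := by
        have := dropWhile_head_false (fun x => !pvIsHeader x) t htd
        simpa using this
      have hsub : ∀ l ∈ h2 :: t2, l ∈ t := by
        intro l hl
        rw [← htd] at hl
        exact (List.dropWhile_sublist _).subset hl
      have hstep : pvStepA (E, PySem.Str.strip h :: (t.takeWhile (fun x => !pvIsHeader x)).map PySem.Str.rstrip) h2
          = (pvPush E (h :: t.takeWhile (fun x => !pvIsHeader x)), [PySem.Str.strip h2]) := by
        unfold pvStepA
        rw [show (PySem.Str.startswith (PySem.Str.strip h2) "## ") = pvIsHeader h2 from rfl, hh2]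
        simp only [if_true]
        rw [fp_hdr h _ (by
          intro l hl
          rcases List.mem_cons.mp hl with rfl | hl
          · exact hbh
          · exact hbf l ((List.takeWhile_sublist _).subset hl)) hh E]
      rw [List.foldl_cons, hstep,
        ih t2 (by
          have : t2.length < t.length := by
            have h1 := List.length_dropWhile_le (fun x => !pvIsHeader x) t
            rw [htd] at h1
            simp at h1
            omega
          omega) (fun l hl => hbf l (hsub l (by simp [hl]))) _ h2 hh2
          (hbf h2 (hsub h2 (by simp)))]
      rw [show pvGosegs (h2 :: t2)
          = (h2 :: t2.takeWhile (fun x => !pvIsHeader x))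
              :: pvGosegs (t2.dropWhile (fun x => !pvIsHeader x)) from by rw [pvGosegs],
        List.foldl_cons, List.foldl_cons]
      rw [List.foldl_cons]

theorem master (lines : List String) (hbf : ∀ l ∈ lines, pvBF l.toList) (E : List String) :
    pvFlushA (lines.foldl pvStepA (E, [])).1 (lines.foldl pvStepA (E, [])).2
      = (pvSegs lines).foldl pvPush E := by
  have htw : ∀ l ∈ lines.takeWhile (fun x => !pvIsHeader x), pvIsHeader l = false := by
    intro l hl
    have := List.mem_takeWhile_imp hl
    simpa using this
  conv_lhs => rw [← List.takeWhile_append_dropWhile (p := fun x => !pvIsHeader x) (l := lines)]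
  rw [List.foldl_append, a_pre _ htw E]
  unfold pvSegs
  cases htd : lines.dropWhile (fun x => !pvIsHeader x) with
  | nil =>
    rw [List.foldl_nil, show pvGosegs [] = [] from by rw [pvGosegs], List.foldl_cons, List.foldl_nil]
    exact fp_pre _ (fun l hl => hbf l ((List.takeWhile_sublist _).subset hl)) E
  | cons h2 t2 =>
    have hh2 : pvIsHeader h2 = true := by
      have := dropWhile_head_false (fun x => !pvIsHeader x) lines htd
      simpa using this
    have hsub : ∀ l ∈ h2 :: t2, l ∈ lines := by
      intro l hl
      rw [← htd] at hl
      exact (List.dropWhile_sublist _).subset hl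
    have hstep : pvStepA (E, ((lines.takeWhile (fun x => !pvIsHeader x)).dropWhile pvBlank).map PySem.Str.rstrip) h2
        = (pvPush E (lines.takeWhile (fun x => !pvIsHeader x)), [PySem.Str.strip h2]) := by
      unfold pvStepA
      rw [show (PySem.Str.startswith (PySem.Str.strip h2) "## ") = pvIsHeader h2 from rfl, hh2]
      simp only [if_true]
      rw [fp_pre _ (fun l hl => hbf l ((List.takeWhile_sublist _).subset hl)) E]
    rw [List.foldl_cons, hstep,
      master2 t2.length t2 le_rfl (fun l hl => hbf l (hsub l (by simp [hl]))) _ h2 hh2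
        (hbf h2 (hsub h2 (by simp))), List.foldl_cons]
    rw [show pvGosegs (h2 :: t2)
        = (h2 :: t2.takeWhile (fun x => !pvIsHeader x))
            :: pvGosegs (t2.dropWhile (fun x => !pvIsHeader x)) from by rw [pvGosegs],
      List.foldl_cons]
    rw [List.foldl_cons]

-- ---------- B side: header indices and slices ----------

def pvHIdx : List String → List Nat
  | [] => []
  | l :: ls => if pvIsHeader l then 0 :: (pvHIdx ls).map (· + 1) else (pvHIdx ls).map (· + 1)

theorem enum_filter (xs : List String) : ∀ (k : Int),
    ((PySem.List.enumerate xs k).filter (fun p => pvIsHeader p.2)).map (fun p => p.1)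
      = (pvHIdx xs).map (fun (n : Nat) => (n : Int) + k) := by
  induction xs with
  | nil => intro k; rfl
  | cons x t ih =>
    intro k
    rw [show PySem.List.enumerate (x :: t) k = (k, x) :: PySem.List.enumerate t (k + 1) from rfl]
    by_cases hx : pvIsHeader x = true
    · rw [List.filter_cons_of_pos (by simpa using hx), List.map_cons, ih (k + 1),
        show pvHIdx (x :: t) = 0 :: (pvHIdx t).map (· + 1) from by rw [pvHIdx, if_pos hx],
        List.map_cons, List.map_map]
      refine congrArg₂ _ (by simp) (List.map_congr_left ?_)
      intro n _
      simp only [Function.comp_apply]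
      push_cast
      ring
    · rw [List.filter_cons_of_neg (by simpa using hx), ih (k + 1),
        show pvHIdx (x :: t) = (pvHIdx t).map (· + 1) from by
          rw [pvHIdx, if_neg (by simpa using hx)],
        List.map_map]
      refine List.map_congr_left ?_
      intro n _
      simp only [Function.comp_apply]
      push_cast
      ring

theorem hidx_nil (xs : List String) (h : ∀ x ∈ xs, pvIsHeader x = false) : pvHIdx xs = [] := by
  induction xs with
  | nil => rfl
  | cons x t ih =>
    rw [pvHIdx, if_neg (by simp [h x (by simp)]), ih (fun y hy => h y (by simp [hy]))]
    rfl

theorem hidx_split : ∀ (xs : List String) (h2 : String) (t2 : List String),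
    xs.dropWhile (fun x => !pvIsHeader x) = h2 :: t2 →
    pvHIdx xs = (xs.takeWhile (fun x => !pvIsHeader x)).length
      :: (pvHIdx t2).map (· + ((xs.takeWhile (fun x => !pvIsHeader x)).length + 1)) := by
  intro xs
  induction xs with
  | nil => intro h2 t2 hd; simp at hd
  | cons x t ih =>
    intro h2 t2 hd
    by_cases hx : pvIsHeader x = true
    · rw [List.dropWhile_cons_of_neg (by simp [hx])] at hd
      injection hd with hd1 hd2
      subst hd2
      rw [pvHIdx, if_pos hx, List.takeWhile_cons_of_neg (by simp [hx])]
      simp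
    · have hx' : pvIsHeader x = false := by simpa using hx
      rw [List.dropWhile_cons_of_pos (by simp [hx'])] at hd
      rw [pvHIdx, if_neg (by simp [hx']), List.takeWhile_cons_of_pos (by simp [hx']),
        ih h2 t2 hd, List.map_cons, List.map_map, List.length_cons]
      refine congrArg₂ _ rfl (List.map_congr_left ?_)
      intro n _
      show n + ((t.takeWhile (fun x => !pvIsHeader x)).length + 1) + 1
          = n + ((t.takeWhile (fun x => !pvIsHeader x)).length + 1 + 1)
      omega

theorem dropWhile_eq_drop_len (l : List String) (p : String → Bool) :
    l.dropWhile p = l.drop (l.takeWhile p).length := by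
  have h : (l.takeWhile p ++ l.dropWhile p).drop (l.takeWhile p).length = l.dropWhile p :=
    List.drop_left
  rw [List.takeWhile_append_dropWhile] at h
  exact h.symm

theorem takeWhile_eq_take_len (l : List String) (p : String → Bool) :
    l.takeWhile p = l.take (l.takeWhile p).length := by
  have h : (l.takeWhile p ++ l.dropWhile p).take (l.takeWhile p).length = l.takeWhile p :=
    List.take_left
  rw [List.takeWhile_append_dropWhile] at h
  exact h.symm

theorem zgo : ∀ (n : Nat) (v : List String), v.length ≤ n →
    ∀ (lines : List String) (k : Nat), lines.drop k = v →
    ∀ (h2 : String) (t2 : List String), v = h2 :: t2 →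
    ((k :: (pvHIdx t2).map (· + (k + 1))).zip ((pvHIdx t2).map (· + (k + 1)) ++ [lines.length])).map
        (fun p => (lines.drop p.1).take (p.2 - p.1))
      = pvGosegs v := by
  intro n
  induction n with
  | zero =>
    intro v hv
    have : v = [] := by cases v <;> simp_all
    subst this
    intro lines k hk h2 t2 hvt
    simp at hvt
  | succ n ih =>
    intro v hv lines k hk h2 t2 hvt
    subst hvt
    have hklen : k + (h2 :: t2).length = lines.length := by
      have := congrArg List.length hk
      rw [List.length_drop] at this
      simp only [List.length_cons] at this ⊢
      omega
    cases htd : t2.dropWhile (fun x => !pvIsHeader x) with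
    | nil =>
      have hnil : pvHIdx t2 = [] := hidx_nil t2 (by
        intro x hx
        have := List.dropWhile_eq_nil_iff.mp htd x hx
        simpa using this)
      rw [hnil]
      show [(k, lines.length)].map (fun p => (lines.drop p.1).take (p.2 - p.1)) = _
      rw [List.map_singleton]
      have htwt : t2.takeWhile (fun x => !pvIsHeader x) = t2 := by
        have := List.takeWhile_append_dropWhile (p := fun x => !pvIsHeader x) (l := t2)
        rw [htd, List.append_nil] at this
        exact this
      rw [show pvGosegs (h2 :: t2)
          = (h2 :: t2.takeWhile (fun x => !pvIsHeader x))
              :: pvGosegs (t2.dropWhile (fun x => !pvIsHeader x)) from by rw [pvGosegs],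
        htd, htwt, show pvGosegs [] = [] from by rw [pvGosegs]]
      rw [hk, show lines.length - k = (h2 :: t2).length from by omega,
        List.take_of_length_le (by simp)]
    | cons h3 t3 =>
      have hsplit := hidx_split t2 h3 t3 htd
      set k2 := (t2.takeWhile (fun x => !pvIsHeader x)).length with hk2
      rw [hsplit]
      rw [List.map_cons, List.map_map]
      have hcomp : ((fun n => n + (k + 1)) ∘ (fun n => n + (k2 + 1)))
          = (fun n => n + ((k + 1 + k2) + 1)) := by
        funext m; simp; omega
      rw [hcomp]
      show ((k :: (k2 + (k + 1)) :: (pvHIdx t3).map (fun n => n + ((k + 1 + k2) + 1))).zip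
          (((k2 + (k + 1)) :: (pvHIdx t3).map (fun n => n + ((k + 1 + k2) + 1))) ++ [lines.length])).map
          (fun p => (lines.drop p.1).take (p.2 - p.1)) = _
      rw [List.cons_append, List.zip_cons_cons, List.map_cons]
      have hfirst : (lines.drop k).take (k2 + (k + 1) - k) = h2 :: t2.takeWhile (fun x => !pvIsHeader x) := by
        rw [hk, show k2 + (k + 1) - k = k2 + 1 from by omega]
        rw [List.take_succ_cons]
        congr 1
        rw [takeWhile_eq_take_len t2 (fun x => !pvIsHeader x)]
      have hdrop : lines.drop (k2 + (k + 1)) = h3 :: t3 := by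
        rw [show k2 + (k + 1) = k + (k2 + 1) from by omega, ← List.drop_drop, hk,
          show (k2 + 1 : Nat) = k2 + 1 from rfl]
        rw [List.drop_succ_cons]
        rw [← htd, dropWhile_eq_drop_len]
      have hlen3 : (h3 :: t3).length ≤ n := by
        have h1 : t3.length < t2.length := by
          have hle := List.length_dropWhile_le (fun x => !pvIsHeader x) t2
          rw [htd] at hle
          simp at hle
          omega
        simp at hv ⊢
        omega
      have := ih (h3 :: t3) hlen3 lines (k2 + (k + 1)) hdrop h3 t3 rfl
      rw [show (k + 1 + k2) + 1 = (k2 + (k + 1)) + 1 from by omega, this, hfirst]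
      rw [show pvGosegs (h2 :: t2)
          = (h2 :: t2.takeWhile (fun x => !pvIsHeader x))
              :: pvGosegs (t2.dropWhile (fun x => !pvIsHeader x)) from by rw [pvGosegs], htd]

theorem slices_nat (lines : List String) :
    ((0 :: pvHIdx lines).zip (pvHIdx lines ++ [lines.length])).map
        (fun p => (lines.drop p.1).take (p.2 - p.1))
      = pvSegs lines := by
  unfold pvSegs
  cases htd : lines.dropWhile (fun x => !pvIsHeader x) with
  | nil =>
    have hnil : pvHIdx lines = [] := hidx_nil lines (by
      intro x hx
      have := List.dropWhile_eq_nil_iff.mp htd x hx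
      simpa using this)
    have htwt : lines.takeWhile (fun x => !pvIsHeader x) = lines := by
      have := List.takeWhile_append_dropWhile (p := fun x => !pvIsHeader x) (l := lines)
      rw [htd, List.append_nil] at this
      exact this
    rw [hnil, htwt, show pvGosegs [] = [] from by rw [pvGosegs]]
    show [(0, lines.length)].map (fun p => (lines.drop p.1).take (p.2 - p.1)) = [lines]
    simp
  | cons h2 t2 =>
    have hsplit := hidx_split lines h2 t2 htd
    set k := (lines.takeWhile (fun x => !pvIsHeader x)).length with hkdef
    rw [hsplit, List.cons_append, List.zip_cons_cons, List.map_cons]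
    have hfirst : (lines.drop 0).take (k - 0) = lines.takeWhile (fun x => !pvIsHeader x) := by
      rw [List.drop_zero, Nat.sub_zero, hkdef, ← takeWhile_eq_take_len]
    have hdrop : lines.drop k = h2 :: t2 := by
      rw [hkdef, ← dropWhile_eq_drop_len, htd]
    rw [hfirst, zgo (h2 :: t2).length (h2 :: t2) le_rfl lines k hdrop h2 t2 rfl]

-- ---------- assembling the two sides ----------

theorem a_side (text : String) (hbf : ∀ l ∈ PySem.Str.splitlines text, pvBF l.toList) :
    parse_lesson_entries_py text = (pvSegs (PySem.Str.splitlines text)).foldl pvPush [] := by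
  unfold parse_lesson_entries_py
  exact master (PySem.Str.splitlines text) hbf []

theorem b_side (text : String) :
    parse_lesson_entries_py_alt text = (pvSegs (PySem.Str.splitlines text)).foldl pvPush [] := by
  have hhead : ((PySem.List.enumerate (PySem.Str.splitlines text) 0).filter
        (fun p => pvIsHeader p.2)).map (fun p => p.1)
      = (pvHIdx (PySem.Str.splitlines text)).map (fun (n : Nat) => (n : Int)) := by
    rw [enum_filter (PySem.Str.splitlines text) 0]
    simp
  show (((0 : Int) :: ((PySem.List.enumerate (PySem.Str.splitlines text) 0).filter
        (fun p => pvIsHeader p.2)).map (fun p => p.1)).zip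
      (((PySem.List.enumerate (PySem.Str.splitlines text) 0).filter
        (fun p => pvIsHeader p.2)).map (fun p => p.1)
        ++ [((PySem.Str.splitlines text).length : Int)])).foldl
      (fun acc p =>
        if normalize_entry (PySem.Str.join "\n"
            (PySem.List.slice (PySem.Str.splitlines text) (some p.1) (some p.2))) = "" then acc
        else acc ++ [normalize_entry (PySem.Str.join "\n"
            (PySem.List.slice (PySem.Str.splitlines text) (some p.1) (some p.2)))]) []
    = _
  rw [hhead]
  rw [show ((0 : Int) :: (pvHIdx (PySem.Str.splitlines text)).map (fun (n : Nat) => (n : Int)))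
      = ((0 :: pvHIdx (PySem.Str.splitlines text)).map (fun (n : Nat) => (n : Int))) from by simp,
    show ((pvHIdx (PySem.Str.splitlines text)).map (fun (n : Nat) => (n : Int))
        ++ [((PySem.Str.splitlines text).length : Int)])
      = ((pvHIdx (PySem.Str.splitlines text) ++ [(PySem.Str.splitlines text).length]).map
          (fun (n : Nat) => (n : Int))) from by simp,
    List.zip_map, List.foldl_map]
  simp only [Prod.map_fst, Prod.map_snd]
  have hcong : List.foldl
      (fun (x : List String) (y : Nat × Nat) =>
        if normalize_entry (PySem.Str.join "\n"
            (PySem.List.slice (PySem.Str.splitlines text) (some (y.1 : Int)) (some (y.2 : Int)))) = ""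
        then x
        else x ++ [normalize_entry (PySem.Str.join "\n"
            (PySem.List.slice (PySem.Str.splitlines text) (some (y.1 : Int)) (some (y.2 : Int))))]) []
      ((0 :: pvHIdx (PySem.Str.splitlines text)).zip
        (pvHIdx (PySem.Str.splitlines text) ++ [(PySem.Str.splitlines text).length]))
      = List.foldl (fun acc (p : Nat × Nat) =>
          pvPush acc (((PySem.Str.splitlines text).drop p.1).take (p.2 - p.1))) []
        ((0 :: pvHIdx (PySem.Str.splitlines text)).zip
          (pvHIdx (PySem.Str.splitlines text) ++ [(PySem.Str.splitlines text).length])) := by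
    apply PySem.List.foldl_congr_mem
    intro acc p _
    rw [PySem.List.slice_natCast]
    rfl
  rw [hcong]
  rw [← List.foldl_map (f := fun p : Nat × Nat => ((PySem.Str.splitlines text).drop p.1).take (p.2 - p.1))
      (g := pvPush), slices_nat]

-- ===== VERDICT (by name: the statement is the Claim_ definition above) =====
theorem parse_lesson_entries_py_spec : Claim_equal_parse_lesson_entries_py := by
  intro text _hdom
  show parse_lesson_entries_py text = parse_lesson_entries_py_alt text
  have hbf : ∀ l ∈ PySem.Str.splitlines text, pvBF l.toList := by
    intro l hl
    have hm : l.toList ∈ (PySem.Str.splitlines text).map String.toList :=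
      List.mem_map_of_mem hl
    rw [PySem.Str.splitlines_map_toList] at hm
    exact splitlines_bfree text.toList l.toList hm
  rw [a_side text hbf, b_side text]
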